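-- pv_equiv track=rewrite | github.com/cwilkes/yolo-octo-bear | collage_maker.py | bucketized_histogram
-- ===== SOURCE A (Python) =====
-- def bucketized_histogram(histogram, breaks):
--     ret = list()
--     cume = 0
--     b = [_[0] for _ in breaks]
--     stop = b.pop(0)
--     for pos, val in enumerate(histogram):
--         cume += val
--         if pos == stop:
--             ret.append(cume)
--             cume = 0
--             if not b:
--                 break
--             stop = b.pop(0)
--     return ret
-- ===== SOURCE B (Python) =====
-- def bucketized_histogram(histogram, breaks):
--     prefix = [0]
--     for v in histogram:
--         prefix.append(prefix[-1] + v)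
--     positions = [t[0] for t in breaks]
--     stop = positions.pop(0)
--     ret = []
--     start = 0
--     while start <= stop < len(histogram):
--         ret.append(prefix[stop + 1] - prefix[start])
--         start = stop + 1
--         if not positions:
--             break
--         stop = positions.pop(0)
--     return ret
-- ===== Notes on version B (the rewrite author's own statement) =====
-- stated objective: alternative
-- what changed: B builds a prefix-sum table once and then loops over the break positions taking table differences, instead of A's running-accumulator scan over the whole histogram with position matching.
import Mathlib
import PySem

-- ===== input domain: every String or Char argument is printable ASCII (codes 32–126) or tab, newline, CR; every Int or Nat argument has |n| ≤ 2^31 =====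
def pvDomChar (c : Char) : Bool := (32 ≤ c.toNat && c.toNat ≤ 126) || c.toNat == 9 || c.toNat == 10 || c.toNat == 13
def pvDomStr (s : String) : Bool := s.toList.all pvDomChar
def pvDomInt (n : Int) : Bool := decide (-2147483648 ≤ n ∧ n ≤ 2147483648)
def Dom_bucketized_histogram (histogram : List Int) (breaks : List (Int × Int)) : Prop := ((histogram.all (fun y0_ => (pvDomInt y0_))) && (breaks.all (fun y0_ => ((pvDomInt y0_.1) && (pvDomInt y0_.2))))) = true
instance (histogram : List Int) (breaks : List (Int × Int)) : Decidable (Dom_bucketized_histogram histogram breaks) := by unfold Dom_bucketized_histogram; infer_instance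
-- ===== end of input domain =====

-- B replaces A's running-accumulator scan of the histogram by a prefix-sum table
-- followed by a loop over the break positions taking differences (alternative decomposition).

-- ===== PORT A =====
-- the for-loop over enumerate(histogram) with state (cume, stop, b, ret); break = returning ret
def pvGoA : List (Int × Int) → Int → Int → List Int → List Int → List Int
  | [], _, _, _, ret => ret
  | (pos, val) :: t, cume, stop, b, ret =>
    if pos = stop then
      match b with
      | [] => ret ++ [cume + val]
      | s :: bs => pvGoA t 0 s bs (ret ++ [cume + val])
    else pvGoA t (cume + val) stop b ret

def bucketized_histogram (histogram : List Int) (breaks : List (Int × Int)) : List Int :=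
  match breaks.map (fun t => t.1) with
  | [] => []  -- Python raises IndexError here (b.pop(0) on empty list); excluded by Pre_
  | stop :: b => pvGoA (PySem.List.enumerate histogram) 0 stop b []

-- ===== PORT B =====
-- prefix = [0]; for v in histogram: prefix.append(prefix[-1] + v)
def pvPrefix (histogram : List Int) : List Int :=
  histogram.foldl (fun p v => p ++ [((PySem.List.pyGet? p (-1)).getD 0) + v]) [0]

-- while start <= stop < n: append prefix[stop+1]-prefix[start]; advance over positions
def pvGoB (pfx : List Int) (n : Int) (start stop : Int) (positions : List Int) (ret : List Int) : List Int :=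
  if start ≤ stop ∧ stop < n then
    let ret2 := ret ++ [((PySem.List.pyGet? pfx (stop + 1)).getD 0) - ((PySem.List.pyGet? pfx start).getD 0)]
    match positions with
    | [] => ret2
    | p :: rest => pvGoB pfx n (stop + 1) p rest ret2
  else ret
termination_by positions.length

def bucketized_histogram_alt (histogram : List Int) (breaks : List (Int × Int)) : List Int :=
  let pfx := pvPrefix histogram
  match breaks.map (fun t => t.1) with
  | [] => []  -- Python raises IndexError here (positions.pop(0) on empty list); excluded by Pre_
  | stop :: positions => pvGoB pfx histogram.length 0 stop positions []

-- ===== PRECONDITION & SPEC =====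
-- Pre_ excludes empty `breaks`, on which both Pythons raise IndexError (pop from empty list).
def Pre_bucketized_histogram (histogram : List Int) (breaks : List (Int × Int)) : Prop := breaks ≠ []
instance (histogram : List Int) (breaks : List (Int × Int)) : Decidable (Pre_bucketized_histogram histogram breaks) := by unfold Pre_bucketized_histogram; infer_instance

def pvWitness_bucketized_histogram : List Int × (List (Int × Int)) := ([1, 2, 3], [(1, 0)])

def Spec_bucketized_histogram (histogram : List Int) (breaks : List (Int × Int)) (out : List Int) : Prop := out = bucketized_histogram_alt histogram breaks
instance (histogram : List Int) (breaks : List (Int × Int)) (out : List Int) : Decidable (Spec_bucketized_histogram histogram breaks out) := by unfold Spec_bucketized_histogram; infer_instance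

-- ===== CLAIM (what is proved, stated in full; the proofs are below) =====
def Claim_equal_bucketized_histogram : Prop := ∀ (histogram : List Int) (breaks : List (Int × Int)), Dom_bucketized_histogram histogram breaks → Pre_bucketized_histogram histogram breaks → Spec_bucketized_histogram histogram breaks (bucketized_histogram histogram breaks)

-- ===== LEMMAS AND PROOFS =====

theorem pvGoA_append (l : List (Int × Int)) : ∀ (cume stop : Int) (b ret : List Int),
    pvGoA l cume stop b ret = ret ++ pvGoA l cume stop b [] := by
  induction l with
  | nil => intro cume stop b ret; simp [pvGoA]
  | cons hd t ih =>
    intro cume stop b ret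
    obtain ⟨pos, val⟩ := hd
    by_cases h : pos = stop
    · cases b with
      | nil => simp [pvGoA, h]
      | cons s bs =>
        simp only [pvGoA, if_pos h]
        rw [ih 0 s bs (ret ++ [cume + val]), ih 0 s bs ([] ++ [cume + val])]
        simp
    · simp only [pvGoA, if_neg h]
      exact ih _ _ _ _

-- scan helper used only to characterise pvPrefix
def pvScan (s : Int) : List Int → List Int
  | [] => []
  | v :: t => (s + v) :: pvScan (s + v) t

theorem pvPrefix_foldl (l : List Int) : ∀ (acc : List Int), acc ≠ [] →
    l.foldl (fun p v => p ++ [((PySem.List.pyGet? p (-1)).getD 0) + v]) acc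
      = acc ++ pvScan (acc.getLast?.getD 0) l := by
  induction l with
  | nil => intro acc _; simp [pvScan]
  | cons v t ih =>
    intro acc hacc
    simp only [List.foldl_cons]
    rw [ih (acc ++ [((PySem.List.pyGet? acc (-1)).getD 0) + v]) (by simp)]
    rw [PySem.List.pyGet?_neg_one]
    simp [pvScan]

theorem pvPrefix_eq (h : List Int) : pvPrefix h = 0 :: pvScan 0 h := by
  unfold pvPrefix
  rw [pvPrefix_foldl h [0] (by simp)]
  simp

theorem pvScan_get (l : List Int) : ∀ (s : Int) (k : Nat), k < l.length →
    (pvScan s l)[k]? = some (s + (l.take (k + 1)).sum) := by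
  induction l with
  | nil => intro s k hk; simp at hk
  | cons v t ih =>
    intro s k hk
    cases k with
    | zero => simp [pvScan]
    | succ k =>
      simp only [pvScan, List.getElem?_cons_succ]
      rw [ih (s + v) k (by simpa using hk)]
      simp [List.take_succ_cons]
      ring

theorem pvPrefix_get (h : List Int) (i : Int) (h0 : 0 ≤ i) (h1 : i ≤ h.length) :
    (PySem.List.pyGet? (pvPrefix h) i).getD 0 = (h.take i.toNat).sum := by
  rw [pvPrefix_eq, PySem.List.pyGet?_of_nonneg _ h0]
  cases hk : i.toNat with
  | zero => simp
  | succ k =>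
    have hkl : k < h.length := by omega
    simp only [List.getElem?_cons_succ]
    rw [pvScan_get h 0 k hkl]
    simp

theorem pvGoB_append (positions : List Int) : ∀ (pfx : List Int) (n start stop : Int) (ret : List Int),
    pvGoB pfx n start stop positions ret = ret ++ pvGoB pfx n start stop positions [] := by
  induction positions with
  | nil =>
    intro pfx n start stop ret
    rw [pvGoB, pvGoB]
    split_ifs <;> simp
  | cons p rest ih =>
    intro pfx n start stop ret
    rw [pvGoB, pvGoB]
    split_ifs with hc
    · simp only []
      rw [ih pfx n (stop + 1) p (ret ++ _), ih pfx n (stop + 1) p ([] ++ _)]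
      simp
    · simp

-- characterisation of A's loop on a suffix enumerated from offset p
theorem pvGoA_char (h' : List Int) : ∀ (p cume stop : Int) (b : List Int),
    pvGoA (PySem.List.enumerate h' p) cume stop b [] =
      if p ≤ stop ∧ stop < p + h'.length then
        (cume + ((h'.take (stop - p + 1).toNat).sum)) ::
          (match b with
           | [] => []
           | s :: bs => pvGoA (PySem.List.enumerate (h'.drop (stop - p + 1).toNat) (stop + 1)) 0 s bs [])
      else [] := by
  induction h' with
  | nil =>
    intro p cume stop b
    simp [PySem.List.enumerate_nil, pvGoA]
  | cons v t ih =>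
    intro p cume stop b
    rw [PySem.List.enumerate_cons]
    by_cases hps : p = stop
    · subst hps
      have hc : p ≤ p ∧ p < p + ((v :: t).length : Int) := by
        constructor
        · exact le_rfl
        · simp
      have h1 : (p - p + 1).toNat = 1 := by omega
      cases b with
      | nil =>
        simp only [pvGoA, if_pos hc, h1]
        simp
      | cons s bs =>
        simp only [pvGoA, if_pos hc, h1]
        rw [pvGoA_append]
        simp
    · simp only [pvGoA, if_neg hps]
      rw [ih (p + 1) (cume + v) stop b]
      by_cases hc : p + 1 ≤ stop ∧ stop < p + 1 + (t.length : Int)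
      · have hc' : p ≤ stop ∧ stop < p + ((v :: t).length : Int) := by
          simp only [List.length_cons]; push_cast; omega
        rw [if_pos hc, if_pos hc']
        have hk : (stop - p + 1).toNat = (stop - (p + 1) + 1).toNat + 1 := by omega
        rw [hk, List.take_succ_cons, List.drop_succ_cons]
        simp [add_assoc]
      · have hc' : ¬ (p ≤ stop ∧ stop < p + ((v :: t).length : Int)) := by
          simp only [List.length_cons]
          push_cast
          intro hcc
          exact hc ⟨by omega, by omega⟩
        rw [if_neg hc, if_neg hc']

-- one unfolding of B's loop, with prefix differences rewritten to take-sums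
theorem pvGoB_char (h : List Int) (start stop : Int) (positions : List Int) (hs : 0 ≤ start) :
    pvGoB (pvPrefix h) h.length start stop positions [] =
      if start ≤ stop ∧ stop < h.length then
        (((h.take (stop + 1).toNat).sum) - ((h.take start.toNat).sum)) ::
          (match positions with
           | [] => []
           | p :: rest => pvGoB (pvPrefix h) h.length (stop + 1) p rest [])
      else [] := by
  rw [pvGoB]
  by_cases hc : start ≤ stop ∧ stop < (h.length : Int)
  · have h1 : (PySem.List.pyGet? (pvPrefix h) (stop + 1)).getD 0 = (h.take (stop + 1).toNat).sum :=
      pvPrefix_get h (stop + 1) (by omega) (by omega)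
    have h2 : (PySem.List.pyGet? (pvPrefix h) start).getD 0 = (h.take start.toNat).sum :=
      pvPrefix_get h start hs (by omega)
    rw [if_pos hc, if_pos hc]
    cases positions with
    | nil => simp [h1, h2]
    | cons p rest =>
      simp only []
      rw [pvGoB_append]
      simp [h1, h2]
  · rw [if_neg hc, if_neg hc]

theorem pvBridge (b : List Int) : ∀ (h : List Int) (p stop : Int), 0 ≤ p →
    pvGoA (PySem.List.enumerate (h.drop p.toNat) p) 0 stop b [] =
      pvGoB (pvPrefix h) h.length p stop b [] := by
  induction b with
  | nil =>
    intro h p stop hp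
    rw [pvGoA_char, pvGoB_char h p stop [] hp]
    by_cases hc : p ≤ stop ∧ stop < (h.length : Int)
    · have hc' : p ≤ stop ∧ stop < p + (((h.drop p.toNat).length : Nat) : Int) := by
        simp only [List.length_drop]; omega
      rw [if_pos hc', if_pos hc]
      have hsplit : (stop + 1).toNat = p.toNat + (stop - p + 1).toNat := by omega
      rw [hsplit, List.take_add, List.sum_append]
      simp only [zero_add]
      congr 1
      ring
    · have hc' : ¬ (p ≤ stop ∧ stop < p + (((h.drop p.toNat).length : Nat) : Int)) := by
        simp only [List.length_drop]; omega
      rw [if_neg hc', if_neg hc]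
  | cons s bs ih =>
    intro h p stop hp
    rw [pvGoA_char, pvGoB_char h p stop (s :: bs) hp]
    by_cases hc : p ≤ stop ∧ stop < (h.length : Int)
    · have hc' : p ≤ stop ∧ stop < p + (((h.drop p.toNat).length : Nat) : Int) := by
        simp only [List.length_drop]; omega
      rw [if_pos hc', if_pos hc]
      have hsplit : (stop + 1).toNat = p.toNat + (stop - p + 1).toNat := by omega
      simp only []
      rw [List.drop_drop, ← hsplit]
      rw [ih h (stop + 1) s (by omega)]
      rw [hsplit, List.take_add, List.sum_append]
      simp only [zero_add]
      congr 1
      ring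
    · have hc' : ¬ (p ≤ stop ∧ stop < p + (((h.drop p.toNat).length : Nat) : Int)) := by
        simp only [List.length_drop]; omega
      rw [if_neg hc', if_neg hc]

-- ===== VERDICT (by name: the statement is the Claim_ definition above) =====
theorem bucketized_histogram_spec : Claim_equal_bucketized_histogram := by
  intro histogram breaks _ _
  unfold Spec_bucketized_histogram bucketized_histogram bucketized_histogram_alt
  cases breaks with
  | nil => simp
  | cons t ts =>
    simp only [List.map_cons]
    have := pvBridge (ts.map (fun t => t.1)) histogram 0 t.1 le_rfl
    simp only [Int.toNat_zero, List.drop_zero] at this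
    simpa using this
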